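-- pv_equiv track=rewrite | github.com/adatechschool/session-kata-aw-l-27-1-24-mouskit2 | awele.py | harvest_process
-- ===== SOURCE A (Python) =====
-- def harvest_process(start_key, dict_list):
--     start = False
--     recolted_seed = 0
--     temp_dict_list = dict_list
--     if "A" in dict_list:
--         temp_dict_list = dict(sorted(dict_list.items(),  reverse = True))
--
--     if start_key in temp_dict_list.keys():
--         for key in temp_dict_list.keys():
--             if key == start_key:
--                 start = True
--             if start:
--                 recolted_seed += dict_list[key]
--                 dict_list[key] = 0
--         return recolted_seed
--     return 0
-- ===== SOURCE B (Python) =====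
-- def harvest_process(start_key, dict_list):
--     # Complement formulation: instead of scanning with a flag and summing the
--     # harvested suffix, sum ALL seeds once and subtract the unharvested prefix,
--     # stopping at start_key; the zeroing walks the keys BACKWARDS and stops at
--     # start_key (same in-place mutation of dict_list as the original).
--     if start_key not in dict_list:
--         return 0
--     keys = sorted(dict_list, reverse=True) if "A" in dict_list else list(dict_list)
--     total = sum(dict_list.values())
--     for k in keys:
--         if k == start_key:
--             break
--         total -= dict_list[k]
--     for k in reversed(keys):
--         dict_list[k] = 0
--         if k == start_key:
--             break
--     return total
-- ===== Notes on version B (the rewrite author's own statement) =====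
-- stated objective: alternative
-- what changed: Replaces A's boolean-flag scan that accumulates the harvested suffix with an arithmetic complement: sum all values once, then subtract the prefix of values before start_key (stopping there), and perform the zeroing by a separate backward walk that stops at start_key.
import Mathlib
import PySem

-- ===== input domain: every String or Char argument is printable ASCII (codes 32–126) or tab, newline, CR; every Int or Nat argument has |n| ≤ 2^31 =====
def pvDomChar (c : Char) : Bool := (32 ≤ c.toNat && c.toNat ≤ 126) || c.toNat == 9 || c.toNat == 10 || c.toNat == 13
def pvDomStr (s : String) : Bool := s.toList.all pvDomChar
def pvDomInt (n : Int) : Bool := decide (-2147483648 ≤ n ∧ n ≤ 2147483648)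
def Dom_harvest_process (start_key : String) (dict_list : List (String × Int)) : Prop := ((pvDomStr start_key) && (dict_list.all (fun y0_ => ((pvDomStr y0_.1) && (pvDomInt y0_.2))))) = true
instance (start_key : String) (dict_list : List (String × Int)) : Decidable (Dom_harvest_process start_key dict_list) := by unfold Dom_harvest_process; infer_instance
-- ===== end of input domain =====

-- B computes the harvest by arithmetic complement (total of all seeds minus the unharvested
-- prefix before start_key) instead of A's boolean-flag suffix scan; same cost, different algorithm.
-- Both Pythons also zero the harvested entries of dict_list in place (B by a backward walk);
-- the theorems here are about the RETURN value only.

-- ===== PORT A =====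
-- the body of A's 'for key in temp_dict_list.keys()' loop: state = (start, recolted_seed, dict_list)
def hp_step (sk : String) (st : Bool × Int × PySem.Dict String Int) (key : String) :
    Bool × Int × PySem.Dict String Int :=
  let st1 := if key == sk then (true, st.2.1, st.2.2) else st
  if st1.1 then (st1.1, st1.2.1 + st1.2.2.getD key 0, st1.2.2.insert key 0) else st1

-- dict_list arrives in Python as a dict: PySem.Dict.ofList is that calling-convention conversion (both ports start with it)
def harvest_process (start_key : String) (dict_list : List (String × Int)) : Int :=
  let d := PySem.Dict.ofList dict_list
  let temp : PySem.Dict String Int :=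
    if d.contains "A" then
      PySem.Dict.mk (PySem.List.sorted2 d.items (fun p => p.1) (fun p => p.2) true)
    else d
  if temp.contains start_key then
    (temp.keys.foldl (hp_step start_key) (false, 0, d)).2.1
  else 0

-- ===== PORT B =====
-- B's 'for k in keys: if k == start_key: break; total -= dict_list[k]' loop
def hpb_sub (sk : String) (d : PySem.Dict String Int) : List String → Int → Int
  | [], t => t
  | k :: rest, t => if k == sk then t else hpb_sub sk d rest (t - d.getD k 0)

-- (B's final backward zeroing loop only mutates dict_list and never affects the returned total)
def harvest_process_alt (start_key : String) (dict_list : List (String × Int)) : Int :=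
  let d := PySem.Dict.ofList dict_list
  if !(d.contains start_key) then 0
  else
    let keys := if d.contains "A" then PySem.List.sorted d.keys (fun k => k) true else d.keys
    let total := d.values.sum
    hpb_sub start_key d keys total

-- ===== PRECONDITION & SPEC =====
def Spec_harvest_process (start_key : String) (dict_list : List (String × Int)) (out : Int) : Prop := out = harvest_process_alt start_key dict_list
instance (start_key : String) (dict_list : List (String × Int)) (out : Int) : Decidable (Spec_harvest_process start_key dict_list out) := by unfold Spec_harvest_process; infer_instance

-- ===== CLAIM (what is proved, stated in full; the proofs are below) =====
def Claim_equal_harvest_process : Prop := ∀ (start_key : String) (dict_list : List (String × Int)), Dom_harvest_process start_key dict_list → Spec_harvest_process start_key dict_list (harvest_process start_key dict_list)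

-- ===== LEMMAS AND PROOFS =====

-- evaluation rules for A's loop body
theorem hp_step_true (sk k : String) (r : Int) (d : PySem.Dict String Int) :
    hp_step sk (true, r, d) k = (true, r + d.getD k 0, d.insert k 0) := by
  unfold hp_step; by_cases h : (k == sk) = true <;> simp [h]

theorem hp_step_false_ne (sk k : String) (r : Int) (d : PySem.Dict String Int) (h : k ≠ sk) :
    hp_step sk (false, r, d) k = (false, r, d) := by
  simp [hp_step, h]

theorem hp_step_false_self (sk : String) (r : Int) (d : PySem.Dict String Int) :
    hp_step sk (false, r, d) sk = (true, r + d.getD sk 0, d.insert sk 0) := by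
  simp [hp_step]

-- a dict with distinct keys returns the stored value of any of its items
theorem hp_getD_of_mem_items {d : PySem.Dict String Int} {k : String} {v : Int}
    (hnd : d.keys.Nodup) (h : (k, v) ∈ d.items) : d.getD k 0 = v := by
  obtain ⟨items⟩ := d
  simp only [PySem.Dict.keys] at hnd
  simp only [PySem.Dict.getD, PySem.Dict.get?]
  simp only at hnd h ⊢
  induction items with
  | nil => simp at h
  | cons p rest ih =>
    simp only [List.map_cons, List.nodup_cons] at hnd
    rcases List.mem_cons.mp h with h1 | h1
    · subst h1; simp [List.find?]
    · have hne : ¬ (p.1 == k) = true := by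
        simp only [beq_iff_eq]
        intro he
        exact hnd.1 (he ▸ (List.mem_map.mpr ⟨(k, v), h1, rfl⟩))
      simp only [List.find?, hne]
      exact ih hnd.2 h1

-- once the flag is set, A's fold adds each remaining key's (pre-zeroing) value
theorem hp_fold_true (sk : String) :
    ∀ (L : List (String × Int)) (d : PySem.Dict String Int) (r : Int),
      (L.map Prod.fst).Nodup → (∀ p ∈ L, d.getD p.1 0 = p.2) →
      ((L.map Prod.fst).foldl (hp_step sk) (true, r, d)).2.1 = r + (L.map Prod.snd).sum := by
  intro L
  induction L with
  | nil => intro d r _ _; simp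
  | cons p rest ih =>
    intro d r hnd hval
    simp only [List.map_cons, List.nodup_cons] at hnd
    have hv : d.getD p.1 0 = p.2 := hval p (List.mem_cons_self ..)
    have hrest : ∀ q ∈ rest, (d.insert p.1 0).getD q.1 0 = q.2 := by
      intro q hq
      have hne : q.1 ≠ p.1 := fun he => hnd.1 (he ▸ (List.mem_map.mpr ⟨q, hq, rfl⟩))
      rw [PySem.Dict.getD_insert_of_ne d 0 0 hne]
      exact hval q (List.mem_cons_of_mem _ hq)
    simp only [List.map_cons, List.foldl_cons, hp_step_true, hv]
    rw [ih (d.insert p.1 0) (r + p.2) hnd.2 hrest]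
    simp; ring

-- A's whole loop equals the suffix sum from start_key on
theorem hp_fold_main (sk : String) :
    ∀ (L : List (String × Int)) (d : PySem.Dict String Int),
      (L.map Prod.fst).Nodup → (∀ p ∈ L, d.getD p.1 0 = p.2) → sk ∈ L.map Prod.fst →
      ((L.map Prod.fst).foldl (hp_step sk) (false, 0, d)).2.1
      = ((L.drop (L.findIdx (fun p => p.1 == sk))).map (fun p => p.2)).sum := by
  intro L
  induction L with
  | nil => intro d _ _ hmem; simp at hmem
  | cons p rest ih =>
    intro d hnd hval hmem
    simp only [List.map_cons, List.nodup_cons] at hnd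
    have hv : d.getD p.1 0 = p.2 := hval p (List.mem_cons_self ..)
    by_cases hp : p.1 = sk
    · subst hp
      have hrest : ∀ q ∈ rest, (d.insert p.1 0).getD q.1 0 = q.2 := by
        intro q hq
        have hne : q.1 ≠ p.1 := fun he => hnd.1 (he ▸ (List.mem_map.mpr ⟨q, hq, rfl⟩))
        rw [PySem.Dict.getD_insert_of_ne d 0 0 hne]
        exact hval q (List.mem_cons_of_mem _ hq)
      simp only [List.map_cons, List.foldl_cons, hp_step_false_self, hv]
      rw [hp_fold_true p.1 rest (d.insert p.1 0) (0 + p.2) hnd.2 hrest]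
      simp [List.findIdx_cons]
    · have hmem' : sk ∈ rest.map Prod.fst := by
        rcases List.mem_cons.mp hmem with h | h
        · exact absurd h.symm hp
        · exact h
      have hne : p.1 ≠ sk := hp
      simp only [List.map_cons, List.foldl_cons, hp_step_false_ne sk p.1 0 d hne]
      rw [ih d hnd.2 (fun q hq => hval q (List.mem_cons_of_mem _ hq)) hmem']
      have : (((p :: rest).findIdx fun q => q.1 == sk)) = (rest.findIdx fun q => q.1 == sk) + 1 := by
        rw [List.findIdx_cons, show (p.1 == sk) = false from beq_eq_false_iff_ne.mpr hne]
        rfl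
      rw [this]
      simp

-- insertBy only ever compares the inserted element against list members, first argument fixed
theorem hp_insertBy_congr {α : Type} (f g : α → α → Bool) (x : α) :
    ∀ (ys : List α), (∀ b ∈ ys, f x b = g x b) → PySem.List.insertBy f x ys = PySem.List.insertBy g x ys := by
  intro ys
  induction ys with
  | nil => intro _; rfl
  | cons y t ih =>
    intro h
    simp only [PySem.List.insertBy]
    rw [h y (List.mem_cons_self ..), ih (fun b hb => h b (List.mem_cons_of_mem _ hb))]

-- an insertion-sort fold is unchanged when the comparator is replaced by one agreeing on S
theorem hp_foldl_insertBy_congr {α : Type} (f g : α → α → Bool) (S : List α)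
    (hfg : ∀ a ∈ S, ∀ b ∈ S, f a b = g a b) :
    ∀ (xs acc : List α), (∀ a ∈ xs, a ∈ S) → (∀ a ∈ acc, a ∈ S) →
      xs.foldl (fun acc x => PySem.List.insertBy f x acc) acc
      = xs.foldl (fun acc x => PySem.List.insertBy g x acc) acc := by
  intro xs
  induction xs with
  | nil => intro acc _ _; rfl
  | cons x t ih =>
    intro acc hxs hacc
    have hx : x ∈ S := hxs x (List.mem_cons_self ..)
    simp only [List.foldl_cons]
    rw [hp_insertBy_congr f g x acc (fun b hb => hfg x hx b (hacc b hb))]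
    exact ih _ (fun a ha => hxs a (List.mem_cons_of_mem _ ha))
      (fun a ha => by
        rcases (PySem.List.mem_insertBy ..).mp ha with h | h
        · exact h ▸ hx
        · exact hacc a h)

-- with distinct first components, Python's tuple sort of the items is a sort by key alone
theorem hp_sorted2_eq_sorted (xs : List (String × Int)) (hnd : (xs.map Prod.fst).Nodup) :
    PySem.List.sorted2 xs (fun p => p.1) (fun p => p.2) true
    = PySem.List.sorted xs (fun p => p.1) true := by
  have hinj : ∀ a ∈ xs, ∀ b ∈ xs, a.1 = b.1 → a = b := by
    intro a ha b hb he
    by_contra hne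
    have := List.inj_on_of_nodup_map hnd ha hb he
    exact hne this
  unfold PySem.List.sorted2 PySem.List.sorted
  apply hp_foldl_insertBy_congr _ _ xs _ xs [] (fun a ha => ha) (by simp)
  intro a ha b hb
  by_cases hab : a = b
  · subst hab; simp
  · have hne : b.1 ≠ a.1 := fun he => hab (hinj b hb a ha he).symm
    rcases lt_trichotomy b.1 a.1 with h | h | h
    · simp [h, not_lt_of_gt h]
    · exact absurd h hne
    · simp [h, not_lt_of_gt h]

-- B's reverse-sorted key list is exactly the first components of A's reverse-sorted item list
theorem hp_keys_sorted_eq (d : PySem.Dict String Int) (hnd : d.keys.Nodup) :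
    PySem.List.sorted d.keys (fun k => k) true
    = (PySem.List.sorted2 d.items (fun p => p.1) (fun p => p.2) true).map Prod.fst := by
  have hndm : (d.items.map Prod.fst).Nodup := by
    simpa only [PySem.Dict.keys] using hnd
  rw [hp_sorted2_eq_sorted d.items hndm]
  apply PySem.List.sorted_rev_eq_of_perm_of_pairwise_gt
  · have : ((PySem.List.sorted d.items (fun p => p.1) true).map Prod.fst).Perm (d.items.map Prod.fst) :=
      (PySem.List.sorted_perm d.items (fun p => p.1) true).map Prod.fst
    simpa only [PySem.Dict.keys] using this
  · have hle : List.Pairwise (fun a b : String × Int => b.1 ≤ a.1)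
        (PySem.List.sorted d.items (fun p => p.1) true) :=
      PySem.List.sorted_pairwise_rev d.items (fun p => p.1)
    have hperm : ((PySem.List.sorted d.items (fun p => p.1) true).map Prod.fst).Perm d.keys := by
      have := (PySem.List.sorted_perm d.items (fun p => p.1) true).map Prod.fst
      simpa only [PySem.Dict.keys] using this
    have hndS : ((PySem.List.sorted d.items (fun p => p.1) true).map Prod.fst).Nodup :=
      (hperm.nodup_iff).mpr hnd
    have hneq : List.Pairwise (fun a b : String × Int => a.1 ≠ b.1)
        (PySem.List.sorted d.items (fun p => p.1) true) := List.pairwise_map.mp hndS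
    rw [List.pairwise_map]
    exact (hle.and hneq).imp (fun h => lt_of_le_of_ne h.1 (fun he => h.2 he.symm))

-- B's subtraction loop removes exactly the prefix of values strictly before start_key
theorem hpb_sub_eq (sk : String) (d : PySem.Dict String Int) :
    ∀ (L : List (String × Int)) (t : Int),
      (∀ p ∈ L, d.getD p.1 0 = p.2) → sk ∈ L.map Prod.fst →
      hpb_sub sk d (L.map Prod.fst) t
      = t - ((L.take (L.findIdx (fun p => p.1 == sk))).map (fun p => p.2)).sum := by
  intro L
  induction L with
  | nil => intro t _ hmem; simp at hmem
  | cons p rest ih =>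
    intro t hval hmem
    by_cases hp : p.1 = sk
    · simp [hpb_sub, List.findIdx_cons, hp]
    · have hmem' : sk ∈ rest.map Prod.fst := by
        rcases List.mem_cons.mp hmem with h | h
        · exact absurd h.symm hp
        · exact h
      have hidx : (((p :: rest).findIdx fun q => q.1 == sk)) = (rest.findIdx fun q => q.1 == sk) + 1 := by
        rw [List.findIdx_cons, show (p.1 == sk) = false from beq_eq_false_iff_ne.mpr hp]
        rfl
      have hv : d.getD p.1 0 = p.2 := hval p (List.mem_cons_self ..)
      simp only [List.map_cons, hpb_sub, show (p.1 == sk) = false from beq_eq_false_iff_ne.mpr hp,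
        Bool.false_eq_true, if_false, hidx, List.take_succ_cons, List.sum_cons, hv]
      rw [ih (t - p.2) (fun q hq => hval q (List.mem_cons_of_mem _ hq)) hmem']
      ring

-- total − prefix = suffix
theorem hp_sum_split (L : List (String × Int)) (n : Nat) :
    (L.map (fun p => p.2)).sum - ((L.take n).map (fun p => p.2)).sum
    = ((L.drop n).map (fun p => p.2)).sum := by
  have h : (L.map (fun p => p.2)).sum
      = ((L.take n).map (fun p => p.2)).sum + ((L.drop n).map (fun p => p.2)).sum := by
    conv_lhs => rw [← List.take_append_drop n L]
    rw [List.map_append, List.sum_append]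
  rw [h]
  ring

-- both branches of the 'if "A" in dict_list' test, uniformly in A's iterated item list L
theorem hp_branch (sk : String) (d : PySem.Dict String Int) (L : List (String × Int))
    (hnd : d.keys.Nodup) (hperm : L.Perm d.items) :
    (if (PySem.Dict.mk L).contains sk then
        (((PySem.Dict.mk L).keys.foldl (hp_step sk) (false, 0, d)).2.1) else 0)
    = if !(d.contains sk) then 0
      else hpb_sub sk d (L.map Prod.fst) d.values.sum := by
  have hceq : (PySem.Dict.mk L).contains sk = d.contains sk := by
    simp only [PySem.Dict.contains]
    exact hperm.any_eq ..
  by_cases hc : d.contains sk = true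
  · rw [hceq, hc]
    simp only [Bool.not_true, Bool.false_eq_true, if_false, if_true]
    have hmem : sk ∈ L.map Prod.fst := by
      have : L.any (fun p => p.1 == sk) = true := by
        simpa only [PySem.Dict.contains] using (hceq.trans hc)
      rcases List.any_eq_true.mp this with ⟨p, hp, he⟩
      exact List.mem_map.mpr ⟨p, hp, beq_iff_eq.mp he⟩
    have hndL : (L.map Prod.fst).Nodup := ((hperm.map Prod.fst).nodup_iff).mpr hnd
    have hval : ∀ p ∈ L, d.getD p.1 0 = p.2 := by
      intro p hp
      exact hp_getD_of_mem_items hnd (hperm.mem_iff.mp hp)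
    have hA : ((L.map Prod.fst).foldl (hp_step sk) (false, 0, d)).2.1
        = ((L.drop (L.findIdx (fun p => p.1 == sk))).map (fun p => p.2)).sum :=
      hp_fold_main sk L d hndL hval hmem
    have hB : hpb_sub sk d (L.map Prod.fst) d.values.sum
        = ((L.drop (L.findIdx (fun p => p.1 == sk))).map (fun p => p.2)).sum := by
      have htot : d.values.sum = (L.map (fun p => p.2)).sum := by
        have : (L.map (fun p => p.2)).Perm (d.items.map (fun p => p.2)) := hperm.map _
        simp only [PySem.Dict.values]
        exact (this.sum_eq).symm
      rw [hpb_sub_eq sk d L _ hval hmem, htot, hp_sum_split]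
    simp only [PySem.Dict.keys]
    rw [hA, hB]
  · rw [hceq]
    simp [hc]

-- ===== VERDICT (by name: the statement is the Claim_ definition above) =====
theorem harvest_process_spec : Claim_equal_harvest_process := by
  intro sk dl _
  unfold Spec_harvest_process harvest_process harvest_process_alt
  have hnd : (PySem.Dict.ofList dl).keys.Nodup := PySem.Dict.nodup_keys_ofList dl
  by_cases hA : (PySem.Dict.ofList dl).contains "A" = true
  · simp only [hA, if_true]
    rw [hp_keys_sorted_eq (PySem.Dict.ofList dl) hnd]
    exact hp_branch sk (PySem.Dict.ofList dl) _ hnd (PySem.List.sorted2_perm ..)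
  · simp only [hA, Bool.false_eq_true, if_false]
    have : (PySem.Dict.ofList dl).keys = (PySem.Dict.ofList dl).items.map Prod.fst := rfl
    rw [this]
    exact hp_branch sk (PySem.Dict.ofList dl) _ hnd (List.Perm.refl _)
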